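-- pv_equiv track=rewrite | github.com/sandrohp88/code_fight | arcade/the core/list_backwoods.py | swapDiagonals
-- ===== SOURCE A (Python) =====
-- def swapDiagonals(matrix):
--     left_diag = [matrix[i][i] for i in range(len(matrix))]
--     right_diag = [matrix[len(matrix) - 1 - i][i]
--                   for i in range(len(matrix) - 1, -1, -1)]
--     for i in range(len(matrix)):
--         matrix[i][i] = right_diag[i]
--         matrix[i][len(matrix[i]) - i - 1] = left_diag[i]
--     return matrix
-- ===== SOURCE B (Python) =====
-- def swapDiagonals(matrix):
--     n = len(matrix)
--     return [
--         [row[i] if j == len(row) - 1 - i else row[n - 1 - i] if j == i else v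
--          for j, v in enumerate(row)]
--         for i, row in enumerate(matrix)
--     ]
-- ===== Notes on version B (the rewrite author's own statement) =====
-- stated objective: simpler
-- what changed: Replaces A's two precomputed diagonal lists and second in-place write pass with a single pure nested comprehension that computes each cell directly (B builds a new matrix instead of mutating; return value is identical).
import Mathlib
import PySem

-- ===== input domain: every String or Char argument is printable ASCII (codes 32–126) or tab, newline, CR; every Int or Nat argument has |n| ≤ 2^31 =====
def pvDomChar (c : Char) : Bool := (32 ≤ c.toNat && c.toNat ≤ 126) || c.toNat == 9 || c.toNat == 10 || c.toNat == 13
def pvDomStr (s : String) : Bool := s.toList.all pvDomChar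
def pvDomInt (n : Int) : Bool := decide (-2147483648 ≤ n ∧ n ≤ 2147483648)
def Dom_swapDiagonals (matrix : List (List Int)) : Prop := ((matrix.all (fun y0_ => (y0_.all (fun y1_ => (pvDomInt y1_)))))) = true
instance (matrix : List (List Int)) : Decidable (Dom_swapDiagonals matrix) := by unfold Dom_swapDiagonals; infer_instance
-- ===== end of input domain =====

-- B replaces A's two precomputed diagonal lists + in-place write pass by one pure nested
-- comprehension computing each cell directly (simpler; return value only — A mutates its argument, B builds a new list).


-- ===== PORT A =====
def swapDiagonals (matrix : List (List Int)) : List (List Int) :=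
  let n : Int := matrix.length
  let left_diag := (PySem.List.pyRange 0 n 1).map
    (fun i => PySem.List.pyGetD (PySem.List.pyGetD matrix i []) i 0)
  let right_diag := (PySem.List.pyRange (n - 1) (-1) (-1)).map
    (fun i => PySem.List.pyGetD (PySem.List.pyGetD matrix (n - 1 - i) []) i 0)
  (PySem.List.pyRange 0 n 1).foldl
    (fun m i =>
      let row := PySem.List.pyGetD m i []
      let row := PySem.List.pySetD row i (PySem.List.pyGetD right_diag i 0)
      let row := PySem.List.pySetD row ((row.length : Int) - i - 1) (PySem.List.pyGetD left_diag i 0)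
      PySem.List.pySetD m i row)
    matrix

-- ===== PORT B =====
def swapDiagonals_alt (matrix : List (List Int)) : List (List Int) :=
  let n : Int := matrix.length
  (PySem.List.enumerate matrix).map (fun p =>
    (PySem.List.enumerate p.2).map (fun q =>
      if q.1 = (p.2.length : Int) - 1 - p.1 then PySem.List.pyGetD p.2 p.1 0
      else if q.1 = p.1 then PySem.List.pyGetD p.2 (n - 1 - p.1) 0
      else q.2))

-- ===== PRECONDITION & SPEC =====
-- Pre_ holds exactly when A returns: each row k is long enough for both diagonal cells
-- (k and n-1-k); on any other input Python A raises IndexError.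
def Pre_swapDiagonals (matrix : List (List Int)) : Prop :=
  ∀ k < matrix.length, k < (matrix.getD k []).length ∧
    matrix.length - 1 - k < (matrix.getD k []).length
instance (matrix : List (List Int)) : Decidable (Pre_swapDiagonals matrix) := by
  unfold Pre_swapDiagonals; infer_instance
def pvWitness_swapDiagonals : List (List Int) := [[1, 2], [3, 4]]
def Spec_swapDiagonals (matrix : List (List Int)) (out : List (List Int)) : Prop := out = swapDiagonals_alt matrix
instance (matrix : List (List Int)) (out : List (List Int)) : Decidable (Spec_swapDiagonals matrix out) := by unfold Spec_swapDiagonals; infer_instance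

-- ===== CLAIM (what is proved, stated in full; the proofs are below) =====
def Claim_equal_swapDiagonals : Prop := ∀ (matrix : List (List Int)), Dom_swapDiagonals matrix → Pre_swapDiagonals matrix → Spec_swapDiagonals matrix (swapDiagonals matrix)

-- ===== LEMMAS AND PROOFS =====

-- generic: a left fold over an increasing index range, each step rewriting exactly slot i
-- from the current value of slot i, is a mapIdx over the touched window
theorem pv_foldl_set_range' (g : ℕ → List Int → List Int) :
    ∀ (cnt s : ℕ) (m : List (List Int)),
    (List.range' s cnt).foldl (fun acc i => acc.set i (g i (acc.getD i []))) m
      = m.mapIdx (fun i row => if s ≤ i ∧ i < s + cnt then g i row else row) := by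
  intro cnt
  induction cnt with
  | zero =>
      intro s m
      simp only [List.range', List.foldl_nil]
      refine (List.ext_getElem (by simp) ?_).symm
      intro i h1 h2
      simp only [List.getElem_mapIdx]
      have : ¬ (s ≤ i ∧ i < s + 0) := by omega
      simp [this]
  | succ k ih =>
      intro s m
      rw [List.range'_succ, List.foldl_cons, ih]
      refine List.ext_getElem (by simp) ?_
      intro i h1 h2
      simp only [List.getElem_mapIdx, List.length_mapIdx, List.length_set] at *
      by_cases hi : i = s
      · subst hi
        have hlt : i < m.length := by simpa using h2
        have h0 : ¬ (i + 1 ≤ i ∧ i < i + 1 + k) := by omega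
        have h1' : i ≤ i ∧ i < i + (k + 1) := by omega
        simp [h0, h1', List.getElem_set , hlt]
      · have hsi : ¬ s = i := fun h => hi h.symm
        simp only [List.getElem_set, hsi, if_false]
        split_ifs <;> first | rfl | omega

theorem pv_enumerate_map {α β : Type} (g : Int × α → β) :
    ∀ (xs : List α) (s : Int),
    (PySem.List.enumerate xs s).map g = xs.mapIdx (fun k x => g (s + k, x)) := by
  intro xs
  induction xs with
  | nil => intro s; simp [PySem.List.enumerate_nil]
  | cons a l ih =>
      intro s
      rw [PySem.List.enumerate_cons, List.map_cons, ih (s + 1), List.mapIdx_cons]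
      refine List.ext_getElem (by simp) ?_
      intro i h1 h2
      cases i with
      | zero => simp
      | succ i =>
          simp only [List.getElem_cons_succ, List.getElem_mapIdx]
          congr 2
          push_cast
          ring

-- proof-only abbreviations for the two diagonal tables of port A and its per-row update
def pvLd (matrix : List (List Int)) : List Int :=
  (PySem.List.pyRange 0 (matrix.length : Int) 1).map
    (fun i => PySem.List.pyGetD (PySem.List.pyGetD matrix i []) i 0)

def pvRd (matrix : List (List Int)) : List Int :=
  (PySem.List.pyRange ((matrix.length : Int) - 1) (-1) (-1)).map
    (fun i => PySem.List.pyGetD (PySem.List.pyGetD matrix ((matrix.length : Int) - 1 - i) []) i 0)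

def pvG (matrix : List (List Int)) (k : ℕ) (row : List Int) : List Int :=
  PySem.List.pySetD (row.set k (PySem.List.pyGetD (pvRd matrix) (k : Int) 0))
    (((row.set k (PySem.List.pyGetD (pvRd matrix) (k : Int) 0)).length : Int) - (k : Int) - 1)
    (PySem.List.pyGetD (pvLd matrix) (k : Int) 0)

theorem pv_A_norm (matrix : List (List Int)) :
    swapDiagonals matrix = List.foldl
      (fun acc i => acc.set i (pvG matrix i (acc.getD i []))) matrix
      (List.range' 0 matrix.length) := by
  simp only [swapDiagonals, pvG, pvRd, pvLd, PySem.List.pyRange_zero_nat, List.foldl_map,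
    List.range_eq_range', PySem.List.pySetD_natCast, PySem.List.pyGetD_natCast]

theorem pv_row_eq (matrix : List (List Int)) (hpre : Pre_swapDiagonals matrix)
    (k : ℕ) (hk : k < matrix.length) :
    pvG matrix k (matrix[k]) = matrix[k].mapIdx (fun j v =>
      if (j : Int) = (matrix[k].length : Int) - 1 - (k : Int) then
        PySem.List.pyGetD matrix[k] (k : Int) 0
      else if (j : Int) = (k : Int) then
        PySem.List.pyGetD matrix[k] ((matrix.length : Int) - 1 - (k : Int)) 0
      else v) := by
  have hrow : matrix.getD k [] = matrix[k] := List.getD_eq_getElem matrix [] hk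
  obtain ⟨hk1, hk2⟩ := hpre k hk
  rw [hrow] at hk1 hk2
  have hld : PySem.List.pyGetD (pvLd matrix) (k : Int) 0 = (matrix[k]'hk).getD k 0 := by
    rw [pvLd, PySem.List.pyRange_zero_nat, List.map_map, PySem.List.pyGetD_natCast]
    simp only [Function.comp_def]
    rw [PySem.List.getD_map_range _ matrix.length k 0 hk]
    simp only [PySem.List.pyGetD_natCast, hrow]
  have hrd : PySem.List.pyGetD (pvRd matrix) (k : Int) 0
      = PySem.List.pyGetD (matrix[k]'hk) ((matrix.length : Int) - 1 - (k : Int)) 0 := by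
    rw [pvRd, PySem.List.pyRange_neg_one, List.map_map, PySem.List.pyGetD_natCast]
    simp only [Function.comp_def]
    have hlen : ((matrix.length : Int) - 1 - -1).toNat = matrix.length := by omega
    rw [hlen, PySem.List.getD_map_range _ matrix.length k 0 hk]
    have h1 : (matrix.length : Int) - 1 - ((matrix.length : Int) - 1 - (k : ℕ)) = (k : Int) := by ring
    rw [h1]
    simp only [PySem.List.pyGetD_natCast, hrow]
  rw [pvG, hld, hrd]
  have hgd : (matrix[k]'hk).getD k 0 = (matrix[k]'hk)[k]'hk1 := List.getD_eq_getElem _ 0 hk1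
  have hrd2 : PySem.List.pyGetD (matrix[k]'hk) ((matrix.length : Int) - 1 - (k : Int)) 0
      = (matrix[k]'hk)[matrix.length - 1 - k]'hk2 := by
    rw [PySem.List.pyGetD_eq_getElem _ 0 (by omega) (by omega)]
    congr 1
    omega
  rw [hrd2, hgd]
  simp only [List.length_set]
  rw [PySem.List.pySetD_of_nonneg _ _ (by omega)]
  have htn : (((matrix[k]'hk).length : Int) - (k : Int) - 1).toNat = (matrix[k]'hk).length - k - 1 := by
    omega
  rw [htn]
  refine List.ext_getElem (by simp) ?_
  intro j hj1 hj2
  simp only [List.getElem_set, List.getElem_mapIdx, PySem.List.pyGetD_natCast, hgd]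
  have hjlt : j < (matrix[k]'hk).length := by simpa using hj2
  split_ifs <;> first | rfl | omega

-- ===== VERDICT (by name: the statement is the Claim_ definition above) =====
theorem swapDiagonals_spec : Claim_equal_swapDiagonals := by
  unfold Claim_equal_swapDiagonals
  intro matrix _ hpre
  unfold Spec_swapDiagonals
  rw [pv_A_norm, pv_foldl_set_range' (pvG matrix) matrix.length 0 matrix]
  show _ = swapDiagonals_alt matrix
  simp only [swapDiagonals_alt, pv_enumerate_map]
  refine (List.ext_getElem (by simp) ?_).symm
  intro k h1 h2
  simp only [List.getElem_mapIdx]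
  have hkn : k < matrix.length := by simpa using h2
  have hcond : 0 ≤ k ∧ k < 0 + matrix.length := by omega
  rw [if_pos hcond, pv_row_eq matrix hpre k hkn]
  simp
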